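-- pv_equiv track=rewrite | github.com/daniel-reich/turbo-robot | EWZqYT4QGMYotfQTu_14.py | tap_code
-- ===== SOURCE A (Python) =====
-- def tap_code(text):
--   #Define letter and code arrays
--   letters = [chr(x) for x in range(97, 123) if x != 107]
--   code = [("."*x + " " + "."*y) for x in range(1,6) for y in range(1,6)]
--
--   if text.find('.') == -1: #If letter string
--     text = ''.join(i if i != 'k' else 'c' for i in text) #Substitute k for c
--     return ' '.join(code[letters.index(i.lower())] for i in text)
--   else:
--     split_pts = [i for i, j in enumerate(text) if j == ' '][1::2] #Index of every other ' '  character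
--     text = ''.join(text[i] if i not in split_pts else '@' for i in range(0,len(text))) #Replace with @
--     return ''.join(letters[code.index(i)] for i in text.split('@'))
-- ===== SOURCE B (Python) =====
-- def tap_code(text):
--     letters = [chr(x) for x in range(97, 123) if x != 107]
--     if '.' not in text:
--         parts = []
--         for ch in text:
--             p = letters.index(('c' if ch == 'k' else ch).lower())
--             parts.append('.' * (p // 5 + 1) + ' ' + '.' * (p % 5 + 1))
--         return ' '.join(parts)
--     out = []
--     groups = text.split(' ')
--     while groups:
--         g1, g2 = groups[0], groups[1]
--         out.append(letters[(len(g1) - 1) * 5 + (len(g2) - 1)])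
--         groups = groups[2:]
--     return ''.join(out)
-- ===== Notes on version B (the rewrite author's own statement) =====
-- stated objective: simpler
-- what changed: B drops A's precomputed 25-entry code table and its enumerate/slice/'@'-marking string surgery: encode derives each tap group arithmetically from the letter index (p//5, p%5), and decode splits on ' ' once and walks the groups two at a time, reading each letter index as (len(g1)-1)*5+(len(g2)-1).
-- outside the precondition, e.g. on tap_code(' '): A raises ValueError, B raises ValueError; on tap_code('@'): A raises ValueError, B raises ValueError
import Mathlib
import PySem

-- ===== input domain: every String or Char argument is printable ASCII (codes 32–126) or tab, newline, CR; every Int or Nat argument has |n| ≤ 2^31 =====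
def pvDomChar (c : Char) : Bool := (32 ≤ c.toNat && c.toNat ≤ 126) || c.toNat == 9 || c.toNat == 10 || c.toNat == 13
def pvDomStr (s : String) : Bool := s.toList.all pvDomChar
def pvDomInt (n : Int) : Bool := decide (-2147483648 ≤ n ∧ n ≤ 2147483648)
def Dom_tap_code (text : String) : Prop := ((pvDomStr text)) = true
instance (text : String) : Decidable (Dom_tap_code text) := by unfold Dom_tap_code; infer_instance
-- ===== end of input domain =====

-- B replaces A's precomputed 25-entry code table and its '@'-marking index surgery by coordinate
-- arithmetic (p//5, p%5) on encode and a pairwise traversal of text.split(' ') on decode (objective: simpler).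

-- ===== PORT A =====
-- letters = [chr(x) for x in range(97, 123) if x != 107]   (shared table, computed identically by A and B)
def tapLetters : List Char :=
  ((PySem.List.pyRange 97 123 1).filter (fun x => x ≠ 107)).map (fun x => Char.ofNat x.toNat)

-- code = [("."*x + " " + "."*y) for x in range(1,6) for y in range(1,6)]
def codeA : List (List Char) :=
  (PySem.List.pyRange 1 6 1).flatMap (fun x =>
    (PySem.List.pyRange 1 6 1).map (fun y =>
      List.replicate x.toNat '.' ++ [' '] ++ List.replicate y.toNat '.'))

-- code[letters.index(i.lower())]  (none = ValueError/IndexError)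
def encA (i : Char) : Option (List Char) :=
  (PySem.List.index? tapLetters (PySem.Chars.lowerChar i)).bind
    (fun idx => PySem.List.pyGet? codeA (idx : Int))

-- letters[code.index(tok)]
def decA (tok : List Char) : Option Char :=
  (PySem.List.index? codeA tok).bind (fun k => PySem.List.pyGet? tapLetters (k : Int))

def tap_code (text : String) : String :=
  if PySem.Chars.find text.toList ['.'] = -1 then
    -- text = ''.join(i if i != 'k' else 'c' for i in text); ' '.join(code[letters.index(i.lower())] for i in text)
    match (text.toList.map (fun i => if i ≠ 'k' then i else 'c')).mapM encA with
    | some pieces => String.ofList (PySem.Chars.join [' '] pieces)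
    | none => ""   -- a ValueError from letters.index: excluded by Pre_
  else
    -- split_pts = [i for i, j in enumerate(text) if j == ' '][1::2]
    -- text = ''.join(text[i] if i not in split_pts else '@' for i in range(0,len(text)))
    -- ''.join(letters[code.index(i)] for i in text.split('@'))
    match (PySem.Chars.splitOn
        ((PySem.List.pyRange 0 text.toList.length 1).map (fun i =>
          if ¬ (i ∈ (PySem.List.slice? (((PySem.List.enumerate text.toList 0).filter
              (fun ij => ij.2 == ' ')).map (fun ij => ij.1)) (some 1) none 2).getD [])
          then PySem.List.pyGetD text.toList i ' ' else '@')) ['@']).mapM decA with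
    | some ls => String.ofList ls
    | none => ""   -- a ValueError from code.index: excluded by Pre_

-- ===== PORT B =====
-- '.' * (p // 5 + 1) + ' ' + '.' * (p % 5 + 1)   (p ≥ 0, so Nat / and % agree with Python's // and %)
def encB (ch : Char) : Option (List Char) :=
  (PySem.List.index? tapLetters (PySem.Chars.lowerChar (if ch = 'k' then 'c' else ch))).map
    (fun p => List.replicate (p / 5 + 1) '.' ++ [' '] ++ List.replicate (p % 5 + 1) '.')

-- while groups: g1, g2 = groups[0], groups[1]; out.append(letters[(len(g1)-1)*5 + (len(g2)-1)]); groups = groups[2:]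
def bPairs (groups : List (List Char)) : Option (List Char) :=
  if h : groups = [] then some []
  else
    match PySem.List.pyGet? groups 0, PySem.List.pyGet? groups 1 with
    | some g1, some g2 =>
      match PySem.List.pyGet? tapLetters (((g1.length : Int) - 1) * 5 + ((g2.length : Int) - 1)) with
      | some c => (bPairs (groups.drop 2)).map (fun l => c :: l)
      | none => none   -- IndexError: excluded by Pre_
    | _, _ => none     -- IndexError on groups[1]: excluded by Pre_
termination_by groups.length
decreasing_by
  have := List.length_pos_of_ne_nil h
  simp only [List.length_drop]
  omega

def tap_code_alt (text : String) : String :=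
  if ¬ PySem.Chars.isIn ['.'] text.toList then
    match text.toList.mapM encB with
    | some parts => String.ofList (PySem.Chars.join [' '] parts)
    | none => ""
  else
    match bPairs (PySem.Chars.splitOn text.toList [' ']) with
    | some out => String.ofList out
    | none => ""

-- ===== PRECONDITION & SPEC =====
-- the 51 characters A encodes without a ValueError: a–z and A–Z except 'K'
-- (A substitutes only lowercase 'k' before lowering, so uppercase 'K' raises)
def tapValid : List Char := "abcdefghijklmnopqrstuvwxyzABCDEFGHIJLMNOPQRSTUVWXYZ".toList

-- Pre_ excludes exactly the inputs where A raises ValueError: letter-mode text with a character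
-- outside a–z/A–Z (or the letter 'K'), and dot-mode text that is not an even-length sequence of
-- 1–5-dot groups separated by single spaces.
def Pre_tap_code (text : String) : Prop :=
  List.Forall (fun c => c ∈ tapValid) text.toList ∨
  ((PySem.Chars.splitOn text.toList [' ']).length % 2 = 0 ∧
    List.Forall (fun g => 1 ≤ g.length ∧ g.length ≤ 5 ∧ List.Forall (fun c => c = '.') g)
      (PySem.Chars.splitOn text.toList [' ']))
instance (text : String) : Decidable (Pre_tap_code text) := by unfold Pre_tap_code; infer_instance

def pvWitness_tap_code : String := "hello"

def Spec_tap_code (text : String) (out : String) : Prop := out = tap_code_alt text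
instance (text : String) (out : String) : Decidable (Spec_tap_code text out) := by
  unfold Spec_tap_code; infer_instance

-- ===== CLAIM (what is proved, stated in full; the proofs are below) =====
def Claim_equal_tap_code : Prop :=
  ∀ (text : String), Dom_tap_code text → Pre_tap_code text → Spec_tap_code text (tap_code text)

-- ===== LEMMAS AND PROOFS =====

-- ---- a recursive description of Python's str.split on a one-character separator ----
def mySplit (d : Char) (pre : List Char) : List Char → List (List Char)
  | [] => [pre]
  | c :: rest => if c = d then pre :: mySplit d [] rest else mySplit d (pre ++ [c]) rest

theorem splitOn_go_eq (d : Char) :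
    ∀ (fuel : Nat) (l cur : List Char) (acc : List (List Char)), l.length < fuel →
      PySem.Chars.splitOn.go [d] fuel l cur acc = acc.reverse ++ mySplit d cur.reverse l := by
  intro fuel
  induction fuel with
  | zero => intro l cur acc h; omega
  | succ n ih =>
    intro l cur acc h
    cases l with
    | nil => simp [PySem.Chars.splitOn.go, mySplit]
    | cons c rest =>
      rw [PySem.Chars.splitOn.go]
      by_cases hc : c = d
      · subst hc
        have hp : List.isPrefixOf [c] (c :: rest) = true := by simp [List.isPrefixOf]
        simp only [hp, if_pos, List.length_cons, List.length_nil, List.drop_succ_cons,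
          List.drop_zero]
        rw [ih rest [] (cur.reverse :: acc) (by simp at h ⊢; omega)]
        simp [mySplit]
      · have hp : List.isPrefixOf [d] (c :: rest) = false := by
          simp [List.isPrefixOf]; exact fun hh => absurd hh.symm hc
        simp only [hp]
        rw [if_neg (by simp)]
        rw [ih rest (c :: cur) acc (by simp at h ⊢; omega)]
        simp [mySplit, hc]

theorem splitOn_eq_mySplit (d : Char) (l : List Char) :
    PySem.Chars.splitOn l [d] = mySplit d [] l := by
  have := splitOn_go_eq d (l.length + 1) l [] [] (by omega)
  simpa [PySem.Chars.splitOn] using this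

theorem mySplit_no_sep (d : Char) :
    ∀ (u : List Char), d ∉ u → ∀ pre, mySplit d pre u = [pre ++ u] := by
  intro u
  induction u with
  | nil => simp [mySplit]
  | cons c rest ih =>
    intro h pre
    simp at h
    simp [mySplit, ih h.2]
    exact fun hh => absurd hh.symm h.1

theorem mySplit_sep (d : Char) :
    ∀ (u v : List Char), d ∉ u → ∀ pre,
      mySplit d pre (u ++ d :: v) = (pre ++ u) :: mySplit d [] v := by
  intro u
  induction u with
  | nil => simp [mySplit]
  | cons c rest ih =>
    intro v h pre
    simp at h
    simp [mySplit, ih _ h.2]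
    exact fun hh => absurd hh.symm h.1

theorem mySplit_ne_nil (d : Char) : ∀ (l pre : List Char), mySplit d pre l ≠ [] := by
  intro l
  induction l with
  | nil => simp [mySplit]
  | cons c rest ih => intro pre; by_cases hc : c = d <;> simp [mySplit, hc, ih]

theorem join_mySplit (d : Char) :
    ∀ (l pre : List Char), PySem.Chars.join [d] (mySplit d pre l) = pre ++ l := by
  intro l
  induction l with
  | nil => simp [mySplit, PySem.Chars.join, List.intercalate]
  | cons c rest ih =>
    intro pre
    by_cases hc : c = d
    · subst hc
      rw [mySplit]
      rw [if_pos rfl]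
      obtain ⟨q, t, hq⟩ := List.exists_cons_of_ne_nil (mySplit_ne_nil c rest [])
      rw [hq, PySem.Chars.join_cons_cons, ← hq, ih]
      simp
    · rw [mySplit]; simp only [if_neg hc]; rw [ih]; simp

theorem splitOn_no_sep (d : Char) (u : List Char) (h : d ∉ u) :
    PySem.Chars.splitOn u [d] = [u] := by
  rw [splitOn_eq_mySplit]; simpa using mySplit_no_sep d u h []

theorem splitOn_sep (d : Char) (u v : List Char) (h : d ∉ u) :
    PySem.Chars.splitOn (u ++ d :: v) [d] = u :: PySem.Chars.splitOn v [d] := by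
  rw [splitOn_eq_mySplit, splitOn_eq_mySplit]; simpa using mySplit_sep d u v h []

theorem join_splitOn (d : Char) (l : List Char) :
    PySem.Chars.join [d] (PySem.Chars.splitOn l [d]) = l := by
  rw [splitOn_eq_mySplit]; simpa using join_mySplit d l []

theorem splitOn_ne_nil (d : Char) (l : List Char) : PySem.Chars.splitOn l [d] ≠ [] := by
  rw [splitOn_eq_mySplit]; exact mySplit_ne_nil d l []

-- ---- xs[1::2] ----
def odds {α : Type} : List α → List α
  | [] => []
  | [_] => []
  | _ :: b :: l => b :: odds l

theorem odds_subset {α : Type} : ∀ (l : List α) (x : α), x ∈ odds l → x ∈ l := by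
  intro l
  induction l using odds.induct with
  | case1 => simp [odds]
  | case2 => simp [odds]
  | case3 a b t ih =>
    intro x hx
    rcases (by simpa [odds] using hx) with h | h
    · simp [h]
    · simpa using Or.inr (Or.inr (ih x h))

theorem aux_filterMap {α : Type} :
    ∀ (l : List α), List.filterMap (fun (k : Nat) => l[((1:Int) + 2 * (k:Int)).toNat]?)
      (List.range (l.length / 2)) = odds l := by
  intro l
  induction l using odds.induct with
  | case1 => simp [odds]
  | case2 a => simp [odds]
  | case3 a b t ih =>
    have hlen : (a :: b :: t).length / 2 = t.length / 2 + 1 := by simp; omega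
    rw [hlen, List.range_succ_eq_map, List.filterMap_cons, List.filterMap_map]
    have h0 : ((a :: b :: t)[((1:Int) + 2 * ((0:Nat):Int)).toNat]?) = some b := by norm_num
    rw [h0]
    have hstep : (List.filterMap ((fun (k : Nat) => (a :: b :: t)[((1:Int) + 2 * (k:Int)).toNat]?) ∘ Nat.succ)
        (List.range (t.length / 2)))
        = List.filterMap (fun (k : Nat) => t[((1:Int) + 2 * (k:Int)).toNat]?) (List.range (t.length / 2)) := by
      apply List.filterMap_congr
      intro k _
      have h2 : ((1:Int) + 2 * ((Nat.succ k : Nat) : Int)).toNat = ((1:Int) + 2 * (k:Int)).toNat + 2 := by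
        push_cast; omega
      simp only [Function.comp_apply, h2, List.getElem?_cons_succ]
    rw [hstep, ih, odds]

theorem slice?_one_two {α : Type} (l : List α) :
    PySem.List.slice? l (some 1) none 2 = some (odds l) := by
  cases l with
  | nil => rfl
  | cons a t =>
    rw [PySem.List.slice?]
    rw [if_neg (by norm_num)]
    simp only [PySem.List.sliceIndices]
    norm_num
    have hc : (if 0 < t.length then (((t.length:Int) + 2 - 1) / 2).toNat else 0)
        = (a :: t).length / 2 := by
      split_ifs with h <;> simp [List.length_cons] <;> omega
    rw [hc, aux_filterMap]

-- ---- the '@' replacement as a function of the index set ----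
def markAt (S : List Int) (cs : List Char) (s : Int) : List Char :=
  (PySem.List.enumerate cs s).map (fun p => if ¬ p.1 ∈ S then p.2 else '@')

theorem markAt_append (S : List Int) (x y : List Char) (s : Int) :
    markAt S (x ++ y) s = markAt S x s ++ markAt S y (s + x.length) := by
  simp [markAt, PySem.List.enumerate_append]

theorem markAt_out (S : List Int) (cs : List Char) (s : Int)
    (h : ∀ (k : Nat), k < cs.length → (s + (k : Int)) ∉ S) : markAt S cs s = cs := by
  unfold markAt
  conv_rhs => rw [← PySem.List.map_snd_enumerate cs s]
  apply List.map_congr_left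
  intro p hp
  obtain ⟨k, hk, rfl⟩ := (PySem.List.mem_enumerate_iff cs s p).1 hp
  simp [h k hk]

theorem markAt_congr (S S' : List Int) (cs : List Char) (s : Int)
    (h : ∀ (k : Nat), k < cs.length → ((s + (k : Int)) ∈ S ↔ (s + (k : Int)) ∈ S')) :
    markAt S cs s = markAt S' cs s := by
  unfold markAt
  apply List.map_congr_left
  intro p hp
  obtain ⟨k, hk, rfl⟩ := (PySem.List.mem_enumerate_iff cs s p).1 hp
  simp only [h k hk]

theorem markAt_single_mem (S : List Int) (c : Char) (s : Int) (h : s ∈ S) :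
    markAt S [c] s = ['@'] := by
  simp [markAt, PySem.List.enumerate_cons, PySem.List.enumerate_nil, h]

theorem markAt_single_not_mem (S : List Int) (c : Char) (s : Int) (h : s ∉ S) :
    markAt S [c] s = [c] := by
  simp [markAt, PySem.List.enumerate_cons, PySem.List.enumerate_nil, h]

-- ---- positions of the separating spaces of ' '.join(gs), starting at offset s ----
def seps : List (List Char) → Int → List Int
  | [], _ => []
  | [_], _ => []
  | g :: h :: t, s => (s + g.length) :: seps (h :: t) (s + (g.length : Int) + 1)

theorem sepsGE (gs : List (List Char)) : ∀ (s : Int) (x : Int), x ∈ seps gs s → s ≤ x := by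
  match gs with
  | [] => simp [seps]
  | [_] => simp [seps]
  | g :: h :: t =>
    intro s x hx
    rcases (by simpa [seps] using hx) with h1 | h1
    · omega
    · have := sepsGE (h :: t) _ _ h1; omega
termination_by gs.length

theorem filter_spaces_nil (g : List Char) (s : Int) (h : ' ' ∉ g) :
    (PySem.List.enumerate g s).filter (fun p => p.2 == ' ') = [] := by
  rw [List.filter_eq_nil_iff]
  intro p hp
  obtain ⟨k, hk, rfl⟩ := (PySem.List.mem_enumerate_iff g s p).1 hp
  simp only [beq_iff_eq]
  intro hc
  exact h (hc ▸ List.getElem_mem hk)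

theorem L_seps (gs : List (List Char)) : ∀ (s : Int), (∀ g ∈ gs, ' ' ∉ g) →
    ((PySem.List.enumerate (PySem.Chars.join [' '] gs) s).filter
      (fun p => p.2 == ' ')).map (fun p => p.1) = seps gs s := by
  match gs with
  | [] => intro s _; simp [seps, PySem.Chars.join, List.intercalate]
  | [g] =>
    intro s hg
    rw [seps]
    simp only [PySem.Chars.join_singleton]
    rw [filter_spaces_nil g s (hg g (by simp))]
    rfl
  | g :: h :: t =>
    intro s hg
    rw [seps, PySem.Chars.join_cons_cons]
    rw [List.append_assoc]
    rw [PySem.List.enumerate_append, List.filter_append, List.map_append]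
    rw [filter_spaces_nil g s (hg g (by simp))]
    rw [PySem.List.enumerate_append, List.filter_append, List.map_append]
    have h1 : (PySem.List.enumerate [' '] (s + (g.length:Int))).filter (fun p => p.2 == ' ')
        = [(s + (g.length:Int), ' ')] := by
      simp [PySem.List.enumerate_cons, PySem.List.enumerate_nil]
    rw [h1, L_seps (h :: t) _ (fun g' hg' => hg g' (by simp [hg']))]
    simp
termination_by gs.length

-- ---- the text after '@'-marking, and A's tokens ----
def pairText : List (List Char) → List Char
  | g1 :: g2 :: g3 :: rest => g1 ++ ' ' :: (g2 ++ '@' :: pairText (g3 :: rest))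
  | g1 :: g2 :: [] => g1 ++ ' ' :: g2
  | [g] => g
  | [] => []

def wfGroups (gs : List (List Char)) : Prop :=
  ∀ g ∈ gs, 1 ≤ g.length ∧ g.length ≤ 5 ∧ ∀ c ∈ g, c = '.'

theorem L_mark (gs : List (List Char)) : ∀ (s : Int), wfGroups gs → gs.length % 2 = 0 →
    markAt (odds (seps gs s)) (PySem.Chars.join [' '] gs) s = pairText gs := by
  match gs with
  | [] =>
    intro s _ _
    simp [seps, odds, pairText, PySem.Chars.join, List.intercalate, markAt,
      PySem.List.enumerate_nil]
  | [g] => intro s _ he; simp at he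
  | [g1, g2] =>
    intro s _ _
    rw [seps, seps]
    rw [show odds [s + (g1.length:Int)] = [] from rfl]
    rw [PySem.Chars.join_cons_cons, PySem.Chars.join_singleton]
    rw [markAt_out _ _ _ (by simp)]
    simp [pairText]
  | g1 :: g2 :: g3 :: t =>
    intro s hwf he
    have hS : odds (seps (g1 :: g2 :: g3 :: t) s)
        = (s + (g1.length:Int) + 1 + (g2.length:Int))
            :: odds (seps (g3 :: t) (s + (g1.length:Int) + 1 + (g2.length:Int) + 1)) := by
      rw [seps, seps, odds]
    set a : Int := (g1.length : Int) with ha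
    set b : Int := (g2.length : Int) with hb
    set q : Int := s + a + 1 + b with hq
    have hS' : ∀ x ∈ odds (seps (g3 :: t) (q + 1)), q + 1 ≤ x :=
      fun x hx => sepsGE _ _ _ (odds_subset _ _ hx)
    rw [hS]
    rw [PySem.Chars.join_cons_cons, PySem.Chars.join_cons_cons]
    rw [List.append_assoc, List.append_assoc]
    rw [markAt_append, markAt_append, markAt_append, markAt_append]
    have c1 : markAt (q :: odds (seps (g3 :: t) (q + 1))) g1 s = g1 := by
      apply markAt_out
      intro k hk hmem
      rcases List.mem_cons.1 hmem with h | h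
      · omega
      · have := hS' _ h; omega
    have c2 : markAt (q :: odds (seps (g3 :: t) (q + 1))) [' '] (s + a) = [' '] := by
      apply markAt_single_not_mem
      intro hmem
      rcases List.mem_cons.1 hmem with h | h
      · omega
      · have := hS' _ h; omega
    have c3 : markAt (q :: odds (seps (g3 :: t) (q + 1))) g2 (s + a + 1) = g2 := by
      apply markAt_out
      intro k hk hmem
      rcases List.mem_cons.1 hmem with h | h
      · omega
      · have := hS' _ h; omega
    have c4 : markAt (q :: odds (seps (g3 :: t) (q + 1))) [' '] (s + a + 1 + b) = ['@'] :=
      markAt_single_mem _ _ _ (by rw [hq]; exact List.mem_cons_self)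
    have c5 : markAt (q :: odds (seps (g3 :: t) (q + 1)))
        (PySem.Chars.join [' '] (g3 :: t)) (s + a + 1 + b + 1) = pairText (g3 :: t) := by
      rw [markAt_congr _ (odds (seps (g3 :: t) (q + 1))) _ _ (by
        intro k hk
        constructor
        · intro hmem
          rcases List.mem_cons.1 hmem with h | h
          · omega
          · exact h
        · intro hmem
          right
          exact hmem)]
      rw [show s + a + 1 + b + 1 = q + 1 by omega]
      exact L_mark (g3 :: t) (q + 1) (fun g hg => hwf g (by simp at hg ⊢; tauto))
        (by simp at he ⊢; omega)
    have e1 : s + (↑g1.length : Int) = s + a := by omega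
    have e2 : s + (↑g1.length : Int) + ↑([' '] : List Char).length = s + a + 1 := by simp; omega
    have e3 : s + a + 1 + (↑g2.length : Int) = s + a + 1 + b := by rw [hb]
    have e4 : s + a + 1 + (↑g2.length : Int) + ↑([' '] : List Char).length = s + a + 1 + b + 1 := by
      simp [hb]
    rw [e1, e2, e3, e4, c1, c2, c3, c4, c5]
    show pairText (g1 :: g2 :: g3 :: t) = _
    rfl
termination_by gs.length

-- ---- per-pair value of A's table lookups ----
theorem P1 (a b : Nat) (h1 : 1 ≤ a) (h2 : a ≤ 5) (h3 : 1 ≤ b) (h4 : b ≤ 5) :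
    decA (List.replicate a '.' ++ ' ' :: List.replicate b '.')
      = PySem.List.pyGet? tapLetters (((a : Int) - 1) * 5 + ((b : Int) - 1))
    ∧ (PySem.List.pyGet? tapLetters (((a : Int) - 1) * 5 + ((b : Int) - 1))).isSome = true := by
  interval_cases a <;> interval_cases b <;> exact ⟨by decide, by decide⟩

theorem not_at_of_wf (g : List Char) (h : ∀ c ∈ g, c = '.') : '@' ∉ g :=
  fun hm => absurd (h _ hm) (by decide)

theorem no_at_tok (g1 g2 : List Char) (h1 : ∀ c ∈ g1, c = '.') (h2 : ∀ c ∈ g2, c = '.') :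
    '@' ∉ g1 ++ ' ' :: g2 := by
  intro hm
  rcases List.mem_append.1 hm with h | h
  · exact not_at_of_wf g1 h1 h
  · rcases List.mem_cons.1 h with h | h
    · exact absurd h (by decide)
    · exact not_at_of_wf g2 h2 h

theorem L_decode (gs : List (List Char)) : wfGroups gs → gs.length % 2 = 0 → gs ≠ [] →
    (PySem.Chars.splitOn (pairText gs) ['@']).mapM decA = bPairs gs := by
  match gs with
  | [] => intro _ _ h; exact absurd rfl h
  | [g] => intro _ he _; simp at he
  | [g1, g2] =>
    intro hwf _ _
    obtain ⟨ha1, ha5, hadot⟩ := hwf g1 (by simp)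
    obtain ⟨hb1, hb5, hbdot⟩ := hwf g2 (by simp)
    have hg1 : g1 = List.replicate g1.length '.' := List.eq_replicate_of_mem hadot
    have hg2 : g2 = List.replicate g2.length '.' := List.eq_replicate_of_mem hbdot
    obtain ⟨hP, hsome⟩ := P1 g1.length g2.length ha1 ha5 hb1 hb5
    obtain ⟨c, hc⟩ := Option.isSome_iff_exists.1 hsome
    rw [pairText, splitOn_no_sep _ _ (no_at_tok g1 g2 hadot hbdot)]
    rw [bPairs]
    rw [dif_neg (by simp)]
    have hd : decA (g1 ++ ' ' :: g2) = some c := by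
      conv_lhs => rw [hg1, hg2]
      rw [hP, hc]
    simp only [List.mapM_cons, List.mapM_nil, hd]
    have hb0 : PySem.List.pyGet? [g1, g2] (0:Int) = some g1 := by simp [pysem]
    have hb1' : PySem.List.pyGet? [g1, g2] (1:Int) = some g2 := by simp [pysem]
    simp only [hb0, hb1', hc]
    simp [bPairs]
  | g1 :: g2 :: g3 :: t =>
    intro hwf he _
    obtain ⟨ha1, ha5, hadot⟩ := hwf g1 (by simp)
    obtain ⟨hb1, hb5, hbdot⟩ := hwf g2 (by simp)
    have hg1 : g1 = List.replicate g1.length '.' := List.eq_replicate_of_mem hadot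
    have hg2 : g2 = List.replicate g2.length '.' := List.eq_replicate_of_mem hbdot
    obtain ⟨hP, hsome⟩ := P1 g1.length g2.length ha1 ha5 hb1 hb5
    obtain ⟨c, hc⟩ := Option.isSome_iff_exists.1 hsome
    have hpt : pairText (g1 :: g2 :: g3 :: t) = (g1 ++ ' ' :: g2) ++ '@' :: pairText (g3 :: t) := by
      rw [pairText]; simp
    rw [hpt, splitOn_sep _ _ _ (no_at_tok g1 g2 hadot hbdot)]
    have hd : decA (g1 ++ ' ' :: g2) = some c := by
      conv_lhs => rw [hg1, hg2]
      rw [hP, hc]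
    rw [List.mapM_cons, hd]
    rw [L_decode (g3 :: t) (fun g hg => hwf g (by simp at hg ⊢; tauto)) (by simp at he ⊢; omega)
      (by simp)]
    conv_rhs => rw [bPairs]
    rw [dif_neg (by simp)]
    have hb0 : PySem.List.pyGet? (g1 :: g2 :: g3 :: t) (0:Int) = some g1 := by simp [pysem]
    have hb1' : PySem.List.pyGet? (g1 :: g2 :: g3 :: t) (1:Int) = some g2 := by simp [pysem]
    simp only [hb0, hb1', hc, List.drop_succ_cons, List.drop_zero]
    cases bPairs (g3 :: t) <;> rfl
termination_by gs.length

-- ---- encode side ----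
theorem P0 : ∀ c ∈ tapValid, encA (if c ≠ 'k' then c else 'c') = encB c := by
  have h : tapValid.all (fun c => decide (encA (if c ≠ 'k' then c else 'c') = encB c)) = true := by
    decide
  intro c hc
  exact of_decide_eq_true (List.all_eq_true.1 h c hc)

theorem L_encode : ∀ (cs : List Char), (∀ c ∈ cs, c ∈ tapValid) →
    (cs.map (fun i => if i ≠ 'k' then i else 'c')).mapM encA = cs.mapM encB := by
  intro cs
  induction cs with
  | nil => intro _; rfl
  | cons c t ih =>
    intro h
    simp only [List.map_cons, List.mapM_cons]
    rw [P0 c (h c (by simp)), ih (fun x hx => h x (by simp [hx]))]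

-- ---- assembly ----
theorem encode_case (text : String) (h : ∀ c ∈ text.toList, c ∈ tapValid) :
    tap_code text = tap_code_alt text := by
  have hdot : '.' ∉ text.toList := by
    intro hm
    exact absurd (h '.' hm) (by decide)
  have hinf : ¬ ['.'] <:+: text.toList := by
    rw [List.singleton_infix_iff]; exact hdot
  unfold tap_code tap_code_alt
  rw [if_pos (by rw [PySem.Chars.find_eq_neg_one_iff]; exact hinf)]
  rw [if_pos (by rw [Bool.not_eq_true, PySem.Chars.isIn_eq_false_iff]; exact hinf)]
  rw [L_encode text.toList h]

theorem decode_case (text : String)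
    (heven : (PySem.Chars.splitOn text.toList [' ']).length % 2 = 0)
    (hwf : wfGroups (PySem.Chars.splitOn text.toList [' '])) :
    tap_code text = tap_code_alt text := by
  have hne : PySem.Chars.splitOn text.toList [' '] ≠ [] := splitOn_ne_nil ' ' text.toList
  have hjoin : PySem.Chars.join [' '] (PySem.Chars.splitOn text.toList [' ']) = text.toList :=
    join_splitOn ' ' text.toList
  obtain ⟨g, t, hgt⟩ := List.exists_cons_of_ne_nil hne
  have hdotg : '.' ∈ g := by
    obtain ⟨h1, _, h3⟩ := hwf g (by rw [hgt]; simp)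
    obtain ⟨c, hc⟩ := List.exists_mem_of_length_pos (l := g) (by omega)
    exact (h3 c hc) ▸ hc
  have hdot : '.' ∈ text.toList := by
    rw [← hjoin, hgt]
    cases t with
    | nil => rw [PySem.Chars.join_singleton]; exact hdotg
    | cons g2 t2 =>
      rw [PySem.Chars.join_cons_cons]
      simp [hdotg]
  have hinf : ['.'] <:+: text.toList := (List.singleton_infix_iff '.' text.toList).2 hdot
  have hnosp : ∀ g' ∈ PySem.Chars.splitOn text.toList [' '], ' ' ∉ g' := by
    intro g' hg' hm
    exact absurd ((hwf g' hg').2.2 ' ' hm) (by decide)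
  unfold tap_code tap_code_alt
  rw [if_neg (by rw [PySem.Chars.find_eq_neg_one_iff]; exact not_not_intro hinf)]
  rw [if_neg (by rw [Bool.not_eq_true, PySem.Chars.isIn_eq_false_iff]; exact not_not_intro hinf)]
  have hs : (((PySem.List.enumerate text.toList 0).filter (fun ij => ij.2 == ' ')).map
      (fun ij => ij.1)) = seps (PySem.Chars.splitOn text.toList [' ']) 0 := by
    conv_lhs => rw [← hjoin]
    exact L_seps _ 0 hnosp
  rw [hs, slice?_one_two, Option.getD_some]
  have hmark : ((PySem.List.pyRange 0 text.toList.length 1).map (fun i =>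
      if ¬ (i ∈ odds (seps (PySem.Chars.splitOn text.toList [' ']) 0))
      then PySem.List.pyGetD text.toList i ' ' else '@'))
      = pairText (PySem.Chars.splitOn text.toList [' ']) := by
    have hm : ((PySem.List.pyRange 0 text.toList.length 1).map (fun i =>
        if ¬ (i ∈ odds (seps (PySem.Chars.splitOn text.toList [' ']) 0))
        then PySem.List.pyGetD text.toList i ' ' else '@'))
        = markAt (odds (seps (PySem.Chars.splitOn text.toList [' ']) 0)) text.toList 0 := by
      rw [markAt, PySem.List.enumerate_eq_map_pyRange text.toList ' ', List.map_map]
      rfl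
    rw [hm]
    have hL := L_mark (PySem.Chars.splitOn text.toList [' ']) 0 hwf heven
    rwa [hjoin] at hL
  rw [hmark, L_decode _ hwf heven hne]

-- ===== VERDICT (by name: the statement is the Claim_ definition above) =====
theorem tap_code_spec : Claim_equal_tap_code := by
  intro text _ hpre
  unfold Spec_tap_code
  rcases hpre with h | ⟨heven, hwf⟩
  · exact encode_case text ((List.forall_iff_forall_mem).1 h)
  · refine decode_case text heven ?_
    intro g hg
    have := (List.forall_iff_forall_mem).1 hwf g hg
    exact ⟨this.1, this.2.1, (List.forall_iff_forall_mem).1 this.2.2⟩
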